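-- pv_equiv track=rewrite | github.com/1zuoAn/zy | service/chains/workflow/select/abroad_goods_graph.py | _normalize_category_id_list
-- ===== SOURCE A (Python) =====
-- def _normalize_category_id_list(
--     category_id_list: list[list[str]], prefix_set: set[tuple[str, ...]]
-- ) -> list[list[str]]:
--     if not category_id_list or not prefix_set:
--         return category_id_list
--
--     normalized: list[list[str]] = []
--     for path in category_id_list:
--         tokens = [str(v).strip() for v in path if str(v).strip()]
--         if not tokens:
--             continue
--         if tuple(tokens) in prefix_set:
--             normalized.append(tokens)
--             continue
--         for i in range(len(tokens) - 1, 0, -1):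
--             if tuple(tokens[:i]) in prefix_set:
--                 normalized.append(tokens[:i])
--                 break
--     return normalized
-- ===== SOURCE B (Python) =====
-- def _normalize_category_id_list(category_id_list, prefix_set):
--     if not category_id_list or not prefix_set:
--         return category_id_list
--     out = []
--     for path in category_id_list:
--         tokens = [s for s in (str(v).strip() for v in path) if s]
--         best = 0
--         prefix = ()
--         for tok in tokens:
--             prefix += (tok,)
--             if prefix in prefix_set:
--                 best = len(prefix)
--         if best:
--             out.append(tokens[:best])
--     return out
-- ===== Notes on version B (the rewrite author's own statement) =====
-- stated objective: alternative
-- what changed: Single forward pass per path that grows the prefix incrementally and remembers the deepest match, replacing A's separate full-tuple test plus backward loop that re-slices tokens[:i] at each step and breaks on the first hit.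
import Mathlib
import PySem

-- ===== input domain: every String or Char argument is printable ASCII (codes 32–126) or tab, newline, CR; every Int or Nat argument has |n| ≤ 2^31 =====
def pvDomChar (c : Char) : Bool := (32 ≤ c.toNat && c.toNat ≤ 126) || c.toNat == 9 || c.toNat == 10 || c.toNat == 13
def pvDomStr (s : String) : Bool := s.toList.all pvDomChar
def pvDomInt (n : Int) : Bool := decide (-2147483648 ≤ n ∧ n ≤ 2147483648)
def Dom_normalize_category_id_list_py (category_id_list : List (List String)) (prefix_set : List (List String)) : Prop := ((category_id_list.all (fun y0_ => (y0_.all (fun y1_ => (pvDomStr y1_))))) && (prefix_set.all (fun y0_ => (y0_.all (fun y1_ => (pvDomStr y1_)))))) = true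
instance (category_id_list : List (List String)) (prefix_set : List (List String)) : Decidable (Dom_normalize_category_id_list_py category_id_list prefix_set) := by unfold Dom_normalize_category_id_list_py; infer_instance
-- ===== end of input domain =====

-- B replaces A's full-tuple test plus backward break-on-first-hit loop by one forward pass per
-- path that grows the pfx incrementally and remembers the deepest match (alternative; same cost).

-- ===== PORT A =====
-- the backward loop `for i in range(len(tokens)-1, 0, -1): if tuple(tokens[:i]) in pfx_set: append; break`
-- (called with len(tokens)-1; tries i, i-1, …, 1; none = loop fell through without break)
def pvALoop (tokens : List String) (pfx_set : List (List String)) : Nat → Option (List String)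
  | 0 => none
  | i+1 => if tokens.take (i+1) ∈ pfx_set then some (tokens.take (i+1)) else pvALoop tokens pfx_set i

def normalize_category_id_list_py (category_id_list : List (List String)) (pfx_set : List (List String)) : List (List String) :=
  if category_id_list = [] ∨ pfx_set = [] then category_id_list
  else
    category_id_list.foldl (fun normalized path =>
      let tokens := (path.filter (fun v => PySem.Str.strip v ≠ "")).map PySem.Str.strip
      if tokens = [] then normalized
      else if tokens ∈ pfx_set then normalized ++ [tokens]
      else match pvALoop tokens pfx_set (tokens.length - 1) with
        | some t => normalized ++ [t]
        | none => normalized) []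

-- ===== PORT B =====
def normalize_category_id_list_py_alt (category_id_list : List (List String)) (pfx_set : List (List String)) : List (List String) :=
  if category_id_list = [] ∨ pfx_set = [] then category_id_list
  else
    category_id_list.foldl (fun out path =>
      let tokens := ((path.map PySem.Str.strip).filter (fun s => s ≠ ""))
      let st := tokens.foldl (fun (st : Nat × List String) tok =>
        let pfx := st.2 ++ [tok]
        if pfx ∈ pfx_set then (pfx.length, pfx) else (st.1, pfx)) (0, [])
      if st.1 ≠ 0 then out ++ [tokens.take st.1] else out) []

-- ===== PRECONDITION & SPEC =====
def Spec_normalize_category_id_list_py (category_id_list : List (List String)) (pfx_set : List (List String)) (out : List (List String)) : Prop := out = normalize_category_id_list_py_alt category_id_list pfx_set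
instance (category_id_list : List (List String)) (pfx_set : List (List String)) (out : List (List String)) : Decidable (Spec_normalize_category_id_list_py category_id_list pfx_set out) := by unfold Spec_normalize_category_id_list_py; infer_instance

-- ===== CLAIM (what is proved, stated in full; the proofs are below) =====
def Claim_equal_normalize_category_id_list_py : Prop := ∀ (category_id_list : List (List String)) (pfx_set : List (List String)), Dom_normalize_category_id_list_py category_id_list pfx_set → Spec_normalize_category_id_list_py category_id_list pfx_set (normalize_category_id_list_py category_id_list pfx_set)

-- ===== LEMMAS AND PROOFS =====

-- largest k with lo < k ≤ lo + d and full.take k ∈ ps, else 0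
def pvGmSeg (ps : List (List String)) (full : List String) (lo : Nat) : Nat → Nat
  | 0 => 0
  | d+1 => if full.take (lo+d+1) ∈ ps then lo+d+1 else pvGmSeg ps full lo d

-- filter-then-map (A) = map-then-filter (B) for the token normalisation
lemma pv_tokens_eq (path : List String) :
    (path.filter (fun v => PySem.Str.strip v ≠ "")).map PySem.Str.strip
      = (path.map PySem.Str.strip).filter (fun s => s ≠ "") := by
  induction path with
  | nil => rfl
  | cons p ps ih =>
    simp only [List.map_cons, List.filter_cons, ne_eq, decide_not] at *
    by_cases h : PySem.Str.strip p = "" <;> simp [h, ih]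

-- A's backward loop returns the take at the largest matching length in (0, m]
lemma pv_aLoop_eq (tokens : List String) (ps : List (List String)) (m : Nat) :
    pvALoop tokens ps m
      = if pvGmSeg ps tokens 0 m = 0 then none else some (tokens.take (pvGmSeg ps tokens 0 m)) := by
  induction m with
  | zero => rfl
  | succ d ih =>
    by_cases h : tokens.take (d+1) ∈ ps
    · simp [pvALoop, pvGmSeg, h]
    · simp [pvALoop, pvGmSeg, h, ih]

-- splitting pvGmSeg at the bottom instead of the top
lemma pv_gmSeg_split (ps : List (List String)) (full : List String) (lo d : Nat) :
    pvGmSeg ps full lo (d+1)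
      = (if pvGmSeg ps full (lo+1) d = 0
          then (if full.take (lo+1) ∈ ps then lo+1 else 0)
          else pvGmSeg ps full (lo+1) d) := by
  induction d with
  | zero => simp [pvGmSeg]
  | succ e ih =>
    have e1 : lo+(e+1)+1 = lo+e+2 := by omega
    have e2 : (lo+1)+e+1 = lo+e+2 := by omega
    have h1 : pvGmSeg ps full lo (e+1+1)
        = if full.take (lo+e+2) ∈ ps then lo+e+2 else pvGmSeg ps full lo (e+1) := by
      show (if full.take (lo+(e+1)+1) ∈ ps then lo+(e+1)+1 else pvGmSeg ps full lo (e+1)) = _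
      rw [e1]
    have h2 : pvGmSeg ps full (lo+1) (e+1)
        = if full.take (lo+e+2) ∈ ps then lo+e+2 else pvGmSeg ps full (lo+1) e := by
      show (if full.take ((lo+1)+e+1) ∈ ps then (lo+1)+e+1 else pvGmSeg ps full (lo+1) e) = _
      rw [e2]
    rw [h1, h2, ih]
    by_cases hA : full.take (lo+e+2) ∈ ps
    · simp [hA]
    · simp [hA]

-- B's inner fold: state after consuming `rest` starting from accumulated prefix `pre`
lemma pv_bfold_eq (ps : List (List String)) (rest : List String) :
    ∀ (pre : List String) (b : Nat),
    rest.foldl (fun (st : Nat × List String) tok =>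
        let pfx := st.2 ++ [tok]
        if pfx ∈ ps then (pfx.length, pfx) else (st.1, pfx)) (b, pre)
      = ((if pvGmSeg ps (pre ++ rest) pre.length rest.length = 0 then b
            else pvGmSeg ps (pre ++ rest) pre.length rest.length), pre ++ rest) := by
  induction rest with
  | nil => intro pre b; simp [pvGmSeg]
  | cons t r ih =>
    intro pre b
    have heq : (pre ++ [t]) ++ r = pre ++ t :: r := by simp
    have htake : (pre ++ t :: r).take (pre.length + 1) = pre ++ [t] := by
      rw [← heq, List.take_append_of_le_length (by simp), List.take_of_length_le (by simp)]
    have hlen : (pre ++ [t]).length = pre.length + 1 := by simp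
    have ih' := ih (pre ++ [t])
    rw [heq, hlen] at ih'
    simp only [List.foldl_cons, List.length_cons]
    rw [pv_gmSeg_split, htake]
    by_cases hm : (pre ++ [t]) ∈ ps
    · simp only [hm, if_true]
      rw [ih' (pre ++ [t]).length, hlen]
      by_cases hz : pvGmSeg ps (pre ++ t :: r) (pre.length + 1) r.length = 0 <;> simp [hz]
    · simp only [hm, if_false]
      rw [ih' b]
      by_cases hz : pvGmSeg ps (pre ++ t :: r) (pre.length + 1) r.length = 0 <;> simp [hz]

-- the two per-path computations agree for an arbitrary token list
lemma pv_path_eq (ps : List (List String)) (acc : List (List String)) (tokens : List String) :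
    (if tokens = [] then acc
      else if tokens ∈ ps then acc ++ [tokens]
      else match pvALoop tokens ps (tokens.length - 1) with
        | some t => acc ++ [t]
        | none => acc)
    = (let st := tokens.foldl (fun (st : Nat × List String) tok =>
          let pfx := st.2 ++ [tok]
          if pfx ∈ ps then (pfx.length, pfx) else (st.1, pfx)) (0, [])
       if st.1 ≠ 0 then acc ++ [tokens.take st.1] else acc) := by
  have hb := pv_bfold_eq ps tokens [] 0
  simp only [List.nil_append, List.length_nil] at hb
  rw [hb]
  cases tokens with
  | nil => simp [pvGmSeg]
  | cons a l =>
    have hnil : (a :: l) ≠ [] := by simp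
    by_cases hmem : (a :: l) ∈ ps
    · have hS : pvGmSeg ps (a :: l) 0 (l.length + 1) = l.length + 1 := by
        show (if (a :: l).take (0+l.length+1) ∈ ps then 0+l.length+1 else pvGmSeg ps (a :: l) 0 l.length) = _
        simp only [Nat.zero_add]
        rw [List.take_of_length_le (by simp)]
        simp [hmem]
      simp [hnil, hmem, hS, List.take_of_length_le]
    · have hS : pvGmSeg ps (a :: l) 0 (l.length + 1) = pvGmSeg ps (a :: l) 0 l.length := by
        show (if (a :: l).take (0+l.length+1) ∈ ps then 0+l.length+1 else pvGmSeg ps (a :: l) 0 l.length) = _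
        simp only [Nat.zero_add]
        rw [List.take_of_length_le (by simp)]
        simp [hmem]
      rw [pv_aLoop_eq]
      simp only [hnil, if_false, hmem, List.length_cons, Nat.add_sub_cancel, hS]
      split_ifs with h0 <;> simp_all

-- ===== VERDICT (by name: the statement is the Claim_ definition above) =====
theorem normalize_category_id_list_py_spec : Claim_equal_normalize_category_id_list_py := by
  intro cl ps _
  unfold Spec_normalize_category_id_list_py normalize_category_id_list_py normalize_category_id_list_py_alt
  split_ifs with h
  · rfl
  · congr 1
    funext acc path
    rw [← pv_tokens_eq]
    exact pv_path_eq ps acc _
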